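-- pv_equiv track=rewrite | github.com/JaViLuMa/AdventOfCode2021 | E - Advent - 5.py | part1
-- ===== SOURCE A (Python) =====
-- def part1(lines):
--   horVer = []
--
--   for x in range(len(lines)):
--     if lines[x][0][0] == lines[x][1][0] or lines[x][0][1] == lines[x][1][1]:
--       horVer.append(lines[x])
--
--   ocean = [['.'] * 1000 for _ in range(1000)]
--
--   for x in range(len(horVer)):
--     x1, x2 = horVer[x][0][0], horVer[x][1][0]
--     y1, y2 = horVer[x][0][1], horVer[x][1][1]
--
--     if x1 >= x2:
--       x1, x2 = x2, x1
--
--     if y1 >= y2: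
--       y1, y2 = y2, y1
--
--     if x1 == x2:
--       for y in range(y1, y2 + 1):
--         if str(ocean[y][x1]).isdigit():
--           ocean[y][x1] += 1
--         else:
--           ocean[y][x1] = 1
--
--     elif y1 == y2:
--       for x in range(x1, x2 + 1):
--         try:
--           if str(ocean[y1][x]).isdigit():
--             ocean[y1][x] += 1
--           else:
--             ocean[y1][x] = 1
--         except:
--           continue
--
--   total = 0
--
--   for x in range(len(ocean)):
--     for y in range(len(ocean[x])):
--       if str(ocean[x][y]).isdigit():
--         if ocean[x][y] > 1:
--           total += 1
--
--   return total
-- ===== SOURCE B (Python) =====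
-- def part1(lines):
--     # Flatten the horizontal/vertical segments into the list of cells they cover,
--     # sort it once, and count runs of length >= 2 in a single linear scan --
--     # no grid and no per-cell counter structure at all.
--     pts = []
--     for (x1, y1), (x2, y2) in lines:
--         if x1 == x2:
--             lo, hi = (y1, y2) if y1 <= y2 else (y2, y1)
--             pts.extend((x1, y) for y in range(lo, hi + 1))
--         elif y1 == y2:
--             lo, hi = (x1, x2) if x1 <= x2 else (x2, x1)
--             pts.extend((x, y1) for x in range(lo, hi + 1))
--     pts.sort()
--     total = 0
--     if pts:
--         prev, run = pts[0], 1
--         for p in pts[1:]: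
--             if p == prev:
--                 run += 1
--             else:
--                 if run >= 2:
--                     total += 1
--                 prev, run = p, 1
--         if run >= 2:
--             total += 1
--     return total
-- ===== Notes on version B (the rewrite author's own statement) =====
-- stated objective: faster
-- what changed: B replaces A's dense 1000x1000 grid (allocate, mark each covered cell, rescan the whole grid) by flattening the segments into their covered-cell list, sorting it once, and counting runs of length >= 2 in one linear scan - no grid and no per-cell counter.
-- outside the precondition, e.g. on part1([((1000, 0), (1000, 3))]): A raises IndexError, B returns 0; on part1([((-1, 0), (-1, 0))]): A returns 0, B returns 0; on part1([((-1000, 5), (-1, 5)), ((0, 5), (999, 5))]): A returns 1000, B returns 0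
import Mathlib
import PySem

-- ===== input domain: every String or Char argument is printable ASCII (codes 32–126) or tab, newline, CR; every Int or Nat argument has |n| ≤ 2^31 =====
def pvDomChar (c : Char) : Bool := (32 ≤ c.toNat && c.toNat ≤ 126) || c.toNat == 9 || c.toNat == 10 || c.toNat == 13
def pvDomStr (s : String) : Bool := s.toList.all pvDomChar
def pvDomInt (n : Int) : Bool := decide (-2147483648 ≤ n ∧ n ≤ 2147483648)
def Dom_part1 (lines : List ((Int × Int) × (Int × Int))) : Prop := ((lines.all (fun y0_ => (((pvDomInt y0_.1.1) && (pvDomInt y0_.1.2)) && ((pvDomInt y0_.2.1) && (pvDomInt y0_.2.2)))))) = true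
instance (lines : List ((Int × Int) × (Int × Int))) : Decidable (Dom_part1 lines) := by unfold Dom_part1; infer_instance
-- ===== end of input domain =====

set_option maxRecDepth 8192

-- B replaces A's dense 1000x1000 grid (allocate, mark cell by cell, rescan the whole
-- grid) by sorting the flattened covered-cell list once and counting runs of length
-- >= 2 in one linear scan; proved equal on segments on the grid (Pre_part1 below).


-- ===== PORT A =====

-- a grid cell of A's `ocean`: the string '.' or an int
inductive Cell
  | dot
  | val (n : Int)
deriving DecidableEq, Repr

-- str(cell)
def cellStr : Cell → String
  | .dot => "."
  | .val n => PySem.Int.toStr n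

-- A's repeated cell update: `if str(c).isdigit(): c += 1 else: c = 1`
-- (the .dot arm under the isdigit test is unreachable: isdigit('.') is false)
def bumpCell (c : Cell) : Cell :=
  if PySem.Str.strIsdigit (cellStr c) then
    match c with
    | .val n => .val (n + 1)
    | .dot => .dot
  else .val 1

-- `ocean[y][x]` update; a failing index skips (the horizontal branch's try/except;
-- on the vertical branch Pre_part1 keeps every index in range, so the guard is
-- only what makes the port total)
def markAt (oc : List (List Cell)) (y x : Int) : List (List Cell) :=
  match PySem.List.pyGet? oc y with
  | none => oc
  | some row =>
    match PySem.List.pyGet? row x with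
    | none => oc
    | some c => PySem.List.pySetD oc y (PySem.List.pySetD row x (bumpCell c))

-- the body of A's marking loop, one segment
def markSeg (oc : List (List Cell)) (seg : (Int × Int) × (Int × Int)) : List (List Cell) :=
  let x1 := seg.1.1
  let x2 := seg.2.1
  let y1 := seg.1.2
  let y2 := seg.2.2
  let xs := if x1 ≥ x2 then (x2, x1) else (x1, x2)
  let ys := if y1 ≥ y2 then (y2, y1) else (y1, y2)
  if xs.1 == xs.2 then
    (PySem.List.pyRange ys.1 (ys.2 + 1) 1).foldl (fun oc y => markAt oc y xs.1) oc
  else if ys.1 == ys.2 then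
    (PySem.List.pyRange xs.1 (xs.2 + 1) 1).foldl (fun oc x => markAt oc ys.1 x) oc
  else oc

def part1 (lines : List ((Int × Int) × (Int × Int))) : Int :=
  let horVer :=
    (PySem.List.pyRange 0 (PySem.List.len lines) 1).foldl
      (fun acc x =>
        let ln := PySem.List.pyGetD lines x ((0, 0), (0, 0))
        if ln.1.1 == ln.2.1 || ln.1.2 == ln.2.2 then acc ++ [ln] else acc) []
  let ocean0 : List (List Cell) :=
    (PySem.List.pyRange 0 1000 1).map (fun _ => PySem.List.pyRepeat [Cell.dot] 1000)
  let ocean :=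
    (PySem.List.pyRange 0 (PySem.List.len horVer) 1).foldl
      (fun oc x => markSeg oc (PySem.List.pyGetD horVer x ((0, 0), (0, 0)))) ocean0
  -- the final scan: `for x in range(len(ocean)): for y in range(len(ocean[x])): …`,
  -- the rows and each row's cells visited in index order
  ocean.foldl
    (fun total row =>
      row.foldl
        (fun total c =>
          if PySem.Str.strIsdigit (cellStr c) then
            match c with
            | .val n => if n > 1 then total + 1 else total
            | .dot => total
          else total) total) 0

-- ===== PORT B =====

-- the covered cells of one input line (`pts.extend(...)` of B; empty for a diagonal)
def segCells (ln : (Int × Int) × (Int × Int)) : List (Int × Int) :=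
  if ln.1.1 == ln.2.1 then
    let lh := if ln.1.2 ≤ ln.2.2 then (ln.1.2, ln.2.2) else (ln.2.2, ln.1.2)
    (PySem.List.pyRange lh.1 (lh.2 + 1) 1).map (fun y => (ln.1.1, y))
  else if ln.1.2 == ln.2.2 then
    let lh := if ln.1.1 ≤ ln.2.1 then (ln.1.1, ln.2.1) else (ln.2.1, ln.1.1)
    (PySem.List.pyRange lh.1 (lh.2 + 1) 1).map (fun x => (x, ln.1.2))
  else []

-- B's run-counting scan over the tail of the sorted list: state (prev, run, total)
def runStep (st : (Int × Int) × Int × Int) (q : Int × Int) : (Int × Int) × Int × Int :=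
  if q = st.1 then (st.1, st.2.1 + 1, st.2.2)
  else (q, 1, st.2.2 + (if 2 ≤ st.2.1 then 1 else 0))

def part1_alt (lines : List ((Int × Int) × (Int × Int))) : Int :=
  let pts := lines.foldl (fun acc ln => acc ++ segCells ln) []
  -- `pts.sort()`: Python's lexicographic tuple order
  match PySem.List.sorted2 pts (fun p => p.1) (fun p => p.2) with
  | [] => 0
  | p :: t =>
    let st := t.foldl runStep (p, 1, 0)
    st.2.2 + (if 2 ≤ st.2.1 then 1 else 0)

-- ===== PRECONDITION & SPEC =====

-- Pre_part1 restricts to horizontal/vertical segments lying on the 1000x1000 grid A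
-- allocates: an off-grid horizontal or vertical segment is excluded — A raises
-- IndexError on off-grid vertical ones, and where it returns, the value is an
-- artefact of its grid (Python negative-index wraparound, cells silently dropped by
-- its try/except). Diagonal lines are ignored by A and are unconstrained.
def Pre_part1 (lines : List ((Int × Int) × (Int × Int))) : Prop :=
  ∀ ln ∈ lines, (ln.1.1 = ln.2.1 ∨ ln.1.2 = ln.2.2) →
    (0 ≤ ln.1.1 ∧ ln.1.1 < 1000 ∧ 0 ≤ ln.1.2 ∧ ln.1.2 < 1000 ∧
     0 ≤ ln.2.1 ∧ ln.2.1 < 1000 ∧ 0 ≤ ln.2.2 ∧ ln.2.2 < 1000)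
instance (lines : List ((Int × Int) × (Int × Int))) : Decidable (Pre_part1 lines) := by
  unfold Pre_part1; infer_instance

def pvWitness_part1 : (List ((Int × Int) × (Int × Int))) := [((1, 1), (1, 3)), ((0, 2), (2, 2))]

def Spec_part1 (lines : List ((Int × Int) × (Int × Int))) (out : Int) : Prop := out = part1_alt lines
instance (lines : List ((Int × Int) × (Int × Int))) (out : Int) : Decidable (Spec_part1 lines out) := by unfold Spec_part1; infer_instance

-- ===== CLAIM (what is proved, stated in full; the proofs are below) =====
def Claim_equal_part1 : Prop := ∀ (lines : List ((Int × Int) × (Int × Int))), Dom_part1 lines → Pre_part1 lines → Spec_part1 lines (part1 lines)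

-- ===== LEMMAS AND PROOFS =====

-- proof-side normal form of segCells, with min/max
def cellsOf (ln : (Int × Int) × (Int × Int)) : List (Int × Int) :=
  if ln.1.1 == ln.2.1 then
    (PySem.List.pyRange (min ln.1.2 ln.2.2) (max ln.1.2 ln.2.2 + 1) 1).map (fun y => (ln.1.1, y))
  else if ln.1.2 == ln.2.2 then
    (PySem.List.pyRange (min ln.1.1 ln.2.1) (max ln.1.1 ln.2.1 + 1) 1).map (fun x => (x, ln.1.2))
  else []

lemma segCells_eq_cellsOf (ln : (Int × Int) × (Int × Int)) : segCells ln = cellsOf ln := by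
  unfold segCells cellsOf
  have h1 : (if ln.1.2 ≤ ln.2.2 then (ln.1.2, ln.2.2) else (ln.2.2, ln.1.2))
      = (min ln.1.2 ln.2.2, max ln.1.2 ln.2.2) := by
    split_ifs with h <;> simp [min_def, max_def] <;> omega
  have h2 : (if ln.1.1 ≤ ln.2.1 then (ln.1.1, ln.2.1) else (ln.2.1, ln.1.1))
      = (min ln.1.1 ln.2.1, max ln.1.1 ln.2.1) := by
    split_ifs with h <;> simp [min_def, max_def] <;> omega
  rw [h1, h2]

-- the cells of all lines, in marking order (proof-side view shared by both ports)
def allCells (lines : List ((Int × Int) × (Int × Int))) : List (Int × Int) :=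
  lines.flatMap cellsOf

def inGrid (p : Int × Int) : Prop := 0 ≤ p.1 ∧ p.1 < 1000 ∧ 0 ≤ p.2 ∧ p.2 < 1000

-- the cell holding count k
def enc (k : Nat) : Cell := if k = 0 then Cell.dot else Cell.val (k : Int)

-- grid invariant: 1000 rows of 1000 cells, cell (x, y) encodes the count of (x, y)
def InvGrid (oc : List (List Cell)) (cs : List (Int × Int)) : Prop :=
  oc.length = 1000 ∧ (∀ row ∈ oc, row.length = 1000) ∧
  ∀ y x : Nat, y < 1000 → x < 1000 →
    PySem.List.pyGetD (PySem.List.pyGetD oc (y : Int) []) (x : Int) Cell.dot =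
      enc (cs.count ((x : Int), (y : Int)))

lemma toDigitsCore_all_digit (fuel n : Nat) (ds : List Char)
    (hds : ∀ c ∈ ds, PySem.Chars.isdigit c = true) :
    ∀ c ∈ Nat.toDigitsCore 10 fuel n ds, PySem.Chars.isdigit c = true := by
  induction fuel generalizing n ds with
  | zero => simpa [Nat.toDigitsCore] using hds
  | succ fuel ih =>
    have hd : PySem.Chars.isdigit (Nat.digitChar (n % 10)) = true := by
      have : n % 10 < 10 := Nat.mod_lt _ (by omega)
      interval_cases h : n % 10 <;> decide
    rw [Nat.toDigitsCore]
    split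
    · intro c hc
      rcases List.mem_cons.1 hc with rfl | hc
      · exact hd
      · exact hds c hc
    · exact ih _ _ (by
        intro c hc
        rcases List.mem_cons.1 hc with rfl | hc
        · exact hd
        · exact hds c hc)

lemma toDigitsCore_length_le (fuel n : Nat) (ds : List Char) :
    ds.length ≤ (Nat.toDigitsCore 10 fuel n ds).length := by
  induction fuel generalizing n ds with
  | zero => simp [Nat.toDigitsCore]
  | succ fuel ih =>
    rw [Nat.toDigitsCore]
    split
    · simp
    · exact le_trans (by simp) (ih (n / 10) (Nat.digitChar (n % 10) :: ds))

lemma toDigits_ne_nil (m : Nat) : Nat.toDigits 10 m ≠ [] := by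
  rw [Nat.toDigits, Nat.toDigitsCore]
  split
  · simp
  · intro h
    have := toDigitsCore_length_le m (m / 10) [Nat.digitChar (m % 10)]
    rw [h] at this
    simp at this

lemma isdigit_toStr_pos (n : Int) (h : 1 ≤ n) :
    PySem.Str.strIsdigit (PySem.Int.toStr n) = true := by
  rw [PySem.Str.strIsdigit_eq, PySem.Int.toList_toStr, PySem.Int.toChars,
    if_neg (by omega : ¬ n < 0)]
  unfold PySem.Chars.strIsdigit
  rw [Bool.and_eq_true, List.all_eq_true]
  constructor
  · simpa [List.isEmpty_iff] using toDigits_ne_nil n.toNat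
  · exact toDigitsCore_all_digit _ _ _ (by simp)

lemma bumpCell_enc (k : Nat) : bumpCell (enc k) = enc (k + 1) := by
  cases k with
  | zero =>
    have h0 : enc 0 = Cell.dot := by rw [enc]; norm_num
    rw [h0]
    decide
  | succ k =>
    have he : enc (k + 1) = Cell.val ((k : Int) + 1) := by
      rw [enc, if_neg (by omega)]
      norm_num
    have hd : PySem.Str.strIsdigit (cellStr (Cell.val ((k : Int) + 1))) = true := by
      rw [cellStr]
      exact isdigit_toStr_pos _ (by omega)
    rw [he]
    show (if PySem.Str.strIsdigit (cellStr (Cell.val ((k : Int) + 1))) then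
      Cell.val ((k : Int) + 1 + 1) else Cell.val 1) = enc (k + 1 + 1)
    rw [if_pos hd, enc, if_neg (by omega)]
    all_goals congr 1

lemma invGrid_markAt {oc : List (List Cell)} {cs : List (Int × Int)} (h : InvGrid oc cs)
    {p : Int × Int} (hp : inGrid p) :
    InvGrid (markAt oc p.2 p.1) (cs ++ [p]) := by
  obtain ⟨hlen, hrows, hcell⟩ := h
  obtain ⟨px, py⟩ := p
  obtain ⟨hx0, hx1, hy0, hy1⟩ := hp
  dsimp only at hx0 hx1 hy0 hy1
  obtain ⟨xn, rfl⟩ : ∃ n : ℕ, px = (n : Int) := ⟨px.toNat, (Int.toNat_of_nonneg hx0).symm⟩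
  obtain ⟨yn, rfl⟩ : ∃ n : ℕ, py = (n : Int) := ⟨py.toNat, (Int.toNat_of_nonneg hy0).symm⟩
  have hxn : xn < 1000 := by exact_mod_cast hx1
  have hyn : yn < 1000 := by exact_mod_cast hy1
  have hynlen : yn < oc.length := by omega
  have hrow : PySem.List.pyGet? oc (yn : Int) = some oc[yn] := by
    rw [PySem.List.pyGet?_natCast, List.getElem?_eq_getElem hynlen]
  have hrlen : oc[yn].length = 1000 := hrows _ (List.getElem_mem hynlen)
  have hxnlen : xn < oc[yn].length := by omega
  have hcel : PySem.List.pyGet? oc[yn] (xn : Int) = some (oc[yn])[xn] := by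
    rw [PySem.List.pyGet?_natCast, List.getElem?_eq_getElem hxnlen]
  have hval : (oc[yn])[xn] = enc (cs.count ((xn : Int), (yn : Int))) := by
    have hc := hcell yn xn hyn hxn
    rwa [PySem.List.pyGetD_ofNat oc yn [] hynlen,
      PySem.List.pyGetD_ofNat oc[yn] xn Cell.dot hxnlen] at hc
  show InvGrid (markAt oc (yn : Int) (xn : Int)) _
  rw [markAt, hrow]
  dsimp only
  rw [hcel]
  dsimp only
  refine ⟨by rw [PySem.List.length_pySetD]; exact hlen, ?_, ?_⟩
  · intro row hrowmem
    rw [PySem.List.pySetD_natCast] at hrowmem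
    rcases List.mem_or_eq_of_mem_set hrowmem with hm | rfl
    · exact hrows row hm
    · rw [PySem.List.pySetD_natCast, List.length_set]
      exact hrlen
  · intro y x hy hx
    rw [PySem.List.pyGetD_pySetD_natCast _ _ _ _ _ hynlen]
    have hcount : ∀ q : Int × Int, q ≠ ((xn : Int), (yn : Int)) →
        (cs ++ [((xn : Int), (yn : Int))]).count q = cs.count q := by
      intro q hq
      rw [List.count_append, List.count_cons, List.count_nil]
      have hq' : ¬((xn : Int), (yn : Int)) = q := fun h => hq h.symm
      simp [hq']
    by_cases hyy : y = yn
    · subst hyy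
      rw [if_pos rfl]
      rw [PySem.List.pyGetD_pySetD_natCast _ _ _ _ _ hxnlen]
      by_cases hxx : x = xn
      · subst hxx
        rw [if_pos rfl, hval, bumpCell_enc]
        congr 1
        rw [List.count_append, List.count_cons, List.count_nil]
        simp
      · rw [if_neg hxx]
        have hc := hcell y x hy hx
        rw [PySem.List.pyGetD_ofNat oc y [] hynlen] at hc
        rw [hc, hcount _ (by simp [hxx])]
    · rw [if_neg hyy]
      have hc := hcell y x hy hx
      rw [hc, hcount _ (by simp [hyy])]

lemma invGrid_foldl (cs : List (Int × Int)) (hcs : ∀ p ∈ cs, inGrid p)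
    (oc : List (List Cell)) (acc : List (Int × Int)) (h : InvGrid oc acc) :
    InvGrid (cs.foldl (fun oc p => markAt oc p.2 p.1) oc) (acc ++ cs) := by
  induction cs generalizing oc acc with
  | nil => simpa using h
  | cons p t ih =>
    rw [List.foldl_cons]
    have := ih (fun q hq => hcs q (List.mem_cons_of_mem p hq))
      (markAt oc p.2 p.1) (acc ++ [p])
      (invGrid_markAt h (hcs p List.mem_cons_self))
    simpa using this

lemma invGrid_init :
    InvGrid ((PySem.List.pyRange 0 1000 1).map (fun _ => PySem.List.pyRepeat [Cell.dot] 1000)) [] := by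
  have hoc : (PySem.List.pyRange 0 1000 1).map (fun _ => PySem.List.pyRepeat [Cell.dot] 1000)
      = List.replicate 1000 (List.replicate 1000 Cell.dot) := by
    rw [List.eq_replicate_iff]
    refine ⟨?_, ?_⟩
    · rw [List.length_map, PySem.List.length_pyRange_one]
      rfl
    · intro b hb
      rw [List.mem_map] at hb
      obtain ⟨_, _, rfl⟩ := hb
      rw [PySem.List.pyRepeat_singleton]
      rfl
  rw [hoc]
  refine ⟨by rw [List.length_replicate], ?_, ?_⟩
  · intro row hrow
    rw [List.eq_of_mem_replicate hrow, List.length_replicate]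
  · intro y x hy hx
    rw [PySem.List.pyGetD_natCast, PySem.List.pyGetD_natCast]
    have h1 : (List.replicate 1000 (List.replicate 1000 Cell.dot)).getD y [] = List.replicate 1000 Cell.dot := by
      rw [List.getD_eq_getElem?_getD, List.getElem?_replicate, if_pos hy, Option.getD_some]
    rw [h1, List.getD_eq_getElem?_getD, List.getElem?_replicate, if_pos hx, Option.getD_some]
    rfl

-- A's marking of one kept segment is the fold of markAt over cellsOf
lemma markSeg_eq_cells (seg : (Int × Int) × (Int × Int)) (oc : List (List Cell)) :
    markSeg oc seg = (cellsOf seg).foldl (fun oc p => markAt oc p.2 p.1) oc := by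
  obtain ⟨⟨x1, y1⟩, ⟨x2, y2⟩⟩ := seg
  unfold markSeg cellsOf
  simp only
  have hx : (if x1 ≥ x2 then (x2, x1) else (x1, x2)) = (min x1 x2, max x1 x2) := by
    split_ifs with h <;> simp [min_def, max_def] <;> omega
  have hy : (if y1 ≥ y2 then (y2, y1) else (y1, y2)) = (min y1 y2, max y1 y2) := by
    split_ifs with h <;> simp [min_def, max_def] <;> omega
  rw [hx, hy]
  simp only
  rcases eq_or_ne x1 x2 with rfl | hxx
  · simp [List.foldl_map]
  · have h1 : ¬ (min x1 x2 = max x1 x2) := by omega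
    rcases eq_or_ne y1 y2 with rfl | hyy
    · simp [hxx, h1, List.foldl_map]
    · have h3 : ¬ (min y1 y2 = max y1 y2) := by omega
      simp [hxx, h1, hyy, h3]

lemma cellsOf_not_kept (ln : (Int × Int) × (Int × Int))
    (h : (ln.1.1 == ln.2.1 || ln.1.2 == ln.2.2) = false) : cellsOf ln = [] := by
  rw [Bool.or_eq_false_iff] at h
  unfold cellsOf
  rw [if_neg (by simp [h.1]), if_neg (by simp [h.2])]

lemma allCells_eq_filter (lines : List ((Int × Int) × (Int × Int))) :
    allCells lines
      = (lines.filter (fun ln => ln.1.1 == ln.2.1 || ln.1.2 == ln.2.2)).flatMap cellsOf := by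
  induction lines with
  | nil => rfl
  | cons ln t ih =>
    unfold allCells at ih ⊢
    rw [List.flatMap_cons, List.filter_cons]
    by_cases hk : (ln.1.1 == ln.2.1 || ln.1.2 == ln.2.2) = true
    · rw [if_pos hk, List.flatMap_cons, ih]
    · rw [if_neg hk, cellsOf_not_kept ln (by simpa using hk), List.nil_append, ih]

lemma mem_allCells_inGrid {lines : List ((Int × Int) × (Int × Int))} (hpre : Pre_part1 lines) :
    ∀ p ∈ allCells lines, inGrid p := by
  intro p hp
  rw [allCells, List.mem_flatMap] at hp
  obtain ⟨ln, hln, hpc⟩ := hp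
  unfold cellsOf at hpc
  split_ifs at hpc with h1 h2
  · have hb := hpre ln hln (Or.inl (by simpa using h1))
    rw [List.mem_map] at hpc
    obtain ⟨y, hy, rfl⟩ := hpc
    rw [PySem.List.mem_pyRange_one] at hy
    exact ⟨by omega, by omega, by simp; omega, by simp; omega⟩
  · have hb := hpre ln hln (Or.inr (by simpa using h2))
    rw [List.mem_map] at hpc
    obtain ⟨x, hx, rfl⟩ := hpc
    rw [PySem.List.mem_pyRange_one] at hx
    exact ⟨by simp; omega, by simp; omega, by omega, by omega⟩
  · simp at hpc

-- the contribution of one cell to A's final scan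
def cellScore (c : Cell) : Int :=
  if PySem.Str.strIsdigit (cellStr c) then
    match c with
    | .val n => if n > 1 then (1 : Int) else 0
    | .dot => 0
  else 0

lemma cellScore_enc (k : Nat) : cellScore (enc k) = if 1 < k then (1 : Int) else 0 := by
  cases k with
  | zero =>
    have h0 : enc 0 = Cell.dot := by rw [enc]; norm_num
    rw [h0]
    decide
  | succ k =>
    have he : enc (k + 1) = Cell.val ((k : Int) + 1) := by
      rw [enc, if_neg (by omega)]
      norm_num
    have hd : PySem.Str.strIsdigit (cellStr (Cell.val ((k : Int) + 1))) = true := by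
      rw [cellStr]
      exact isdigit_toStr_pos _ (by omega)
    rw [he, cellScore, if_pos hd]
    show (if (k : Int) + 1 > 1 then (1 : Int) else 0) = _
    split_ifs <;> omega

-- sum over the grid = sum over the distinct covered cells, when every covered cell is on the grid
lemma sum_map_list_range (n : ℕ) (f : ℕ → Int) :
    ((List.range n).map f).sum = ∑ i ∈ Finset.range n, f i := by
  induction n with
  | zero => simp
  | succ n ih =>
    rw [List.range_succ, List.map_append, List.sum_append, Finset.sum_range_succ, ih]
    simp

lemma grid_sum_general (N : ℕ) (cs : List (Int × Int))
    (hcs : ∀ p ∈ cs, 0 ≤ p.1 ∧ p.1 < (N : Int) ∧ 0 ≤ p.2 ∧ p.2 < (N : Int)) :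
    ((List.range N).map (fun (y : ℕ) =>
      ((List.range N).map (fun (x : ℕ) =>
        (if 1 < cs.count ((x : Int), (y : Int)) then (1 : Int) else 0))).sum)).sum
    = ∑ p ∈ cs.toFinset, (if 1 < cs.count p then (1 : Int) else 0) := by
  have e_inj : Function.Injective (fun q : ℕ × ℕ => ((q.2 : Int), (q.1 : Int))) := by
    intro a b hab
    simp only [Prod.mk.injEq, Nat.cast_inj] at hab
    exact Prod.ext hab.2 hab.1
  have h1 : ((List.range N).map (fun (y : ℕ) =>
      ((List.range N).map (fun (x : ℕ) =>
        (if 1 < cs.count ((x : Int), (y : Int)) then (1 : Int) else 0))).sum)).sum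
      = ∑ q ∈ Finset.range N ×ˢ Finset.range N,
          (fun p => if 1 < cs.count p then (1 : Int) else 0) ((q.2 : Int), (q.1 : Int)) := by
    rw [Finset.sum_product, sum_map_list_range]
    refine Finset.sum_congr rfl fun y _ => ?_
    rw [sum_map_list_range]
  rw [h1,
    ← Finset.sum_image (f := fun p => if 1 < cs.count p then (1 : Int) else 0)
      (g := fun q : ℕ × ℕ => ((q.2 : Int), (q.1 : Int)))
      (fun a _ b _ hab => e_inj hab)]
  apply Eq.symm
  apply Finset.sum_subset
  · intro p hp
    rw [List.mem_toFinset] at hp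
    obtain ⟨hg1, hg2, hg3, hg4⟩ := hcs p hp
    rw [Finset.mem_image]
    refine ⟨(p.2.toNat, p.1.toNat), ?_, ?_⟩
    · rw [Finset.mem_product]
      constructor <;> rw [Finset.mem_range] <;> omega
    · simp only
      rw [Int.toNat_of_nonneg hg1, Int.toNat_of_nonneg hg3]
  · intro p _ hp
    rw [List.mem_toFinset] at hp
    rw [if_neg]
    intro hcount
    exact hp (List.count_pos_iff.1 (by omega))

lemma grid_sum_eq_finset_sum (cs : List (Int × Int)) (hcs : ∀ p ∈ cs, inGrid p) :
    ((List.range 1000).map (fun (y : ℕ) =>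
      ((List.range 1000).map (fun (x : ℕ) =>
        (if 1 < cs.count ((x : Int), (y : Int)) then (1 : Int) else 0))).sum)).sum
    = ∑ p ∈ cs.toFinset, (if 1 < cs.count p then (1 : Int) else 0) := by
  apply grid_sum_general 1000 cs
  intro p hp
  obtain ⟨h1, h2, h3, h4⟩ := hcs p hp
  refine ⟨h1, by exact_mod_cast h2, h3, by exact_mod_cast h4⟩

lemma part1_eq (lines : List ((Int × Int) × (Int × Int))) (hpre : Pre_part1 lines) :
    part1 lines = ((List.range 1000).map (fun (y : ℕ) =>
      ((List.range 1000).map (fun (x : ℕ) =>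
        (if 1 < (allCells lines).count ((x : Int), (y : Int)) then (1 : Int) else 0))).sum)).sum := by
  have hstep : (fun (total : Int) (c : Cell) =>
      if PySem.Str.strIsdigit (cellStr c) then
        match c with
        | .val n => if n > 1 then total + 1 else total
        | .dot => total
      else total)
      = fun total c => total + cellScore c := by
    funext total c
    cases c <;> simp only [cellScore] <;> split_ifs <;> ring
  unfold part1
  simp only
  rw [PySem.List.foldl_pyRange_zero_pyGetD lines ((0, 0), (0, 0))
    (fun acc ln => if (ln.1.1 == ln.2.1 || ln.1.2 == ln.2.2) = true then acc ++ [ln] else acc) [],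
    PySem.List.foldl_append_if_eq_filter, List.nil_append,
    PySem.List.foldl_pyRange_zero_pyGetD _ ((0, 0), (0, 0)) markSeg _,
    show markSeg = fun oc seg => (cellsOf seg).foldl (fun oc p => markAt oc p.2 p.1) oc
      from funext fun oc => funext fun seg => markSeg_eq_cells seg oc,
    ← List.foldl_flatMap (f := cellsOf) (g := fun oc p => markAt oc p.2 p.1)
      (l := lines.filter (fun ln => ln.1.1 == ln.2.1 || ln.1.2 == ln.2.2))
      (init := (PySem.List.pyRange 0 1000 1).map fun _ => PySem.List.pyRepeat [Cell.dot] 1000),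
    ← allCells_eq_filter]
  have hinv := invGrid_foldl (allCells lines) (mem_allCells_inGrid hpre) _ [] invGrid_init
  rw [List.nil_append] at hinv
  obtain ⟨hlen, hrows, hcell⟩ := hinv
  have htab : (allCells lines).foldl (fun oc p => markAt oc p.2 p.1)
        ((PySem.List.pyRange 0 1000 1).map fun _ => PySem.List.pyRepeat [Cell.dot] 1000)
      = (List.range 1000).map (fun (y : ℕ) => (List.range 1000).map
          (fun (x : ℕ) => enc ((allCells lines).count ((x : Int), (y : Int))))) := by
    apply List.ext_getElem
    · rw [hlen, List.length_map, List.length_range]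
    intro y hy1 hy2
    rw [List.length_map, List.length_range] at hy2
    have hylen : y < 1000 := hy2
    rw [List.getElem_map, List.getElem_range]
    apply List.ext_getElem
    · rw [hrows _ (List.getElem_mem hy1), List.length_map, List.length_range]
    intro x hx1 hx2
    rw [List.length_map, List.length_range] at hx2
    rw [List.getElem_map, List.getElem_range]
    have hc := hcell y x hylen hx2
    rwa [PySem.List.pyGetD_ofNat _ y [] (by omega),
      PySem.List.pyGetD_ofNat _ x Cell.dot (by omega)] at hc
  rw [hstep]
  have houter : (fun (total : Int) (row : List Cell) =>
        row.foldl (fun total c => total + cellScore c) total)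
      = fun total row => total + (row.map cellScore).sum := by
    funext total row
    rw [PySem.List.foldl_add]
  rw [houter, PySem.List.foldl_add (g := fun row : List Cell => (List.map cellScore row).sum) (a := 0),
    zero_add, htab, List.map_map]
  simp only [Function.comp_def, List.map_map, cellScore_enc]

-- ---- B side: sortedness of Python's tuple sort and the run-counting scan ----

-- Python's `<` on int pairs (the comparison sorted2 sorts by)
def pyLt (a b : Int × Int) : Bool :=
  decide (a.1 < b.1) || (!decide (b.1 < a.1) && decide (a.2 < b.2))

lemma pyLt_asymm {a b : Int × Int} (h : pyLt a b = true) : pyLt b a = false := by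
  simp only [pyLt, Bool.or_eq_true, Bool.and_eq_true, Bool.not_eq_true', decide_eq_true_eq,
    decide_eq_false_iff_not, Bool.or_eq_false_iff, Bool.and_eq_false_iff,
    Bool.not_eq_false'] at *
  omega

lemma pyLt_le_trans {x y z : Int × Int} (h1 : pyLt x y = true) (h2 : pyLt z y = false) :
    pyLt z x = false := by
  simp only [pyLt, Bool.or_eq_true, Bool.and_eq_true, Bool.not_eq_true', decide_eq_true_eq,
    decide_eq_false_iff_not, Bool.or_eq_false_iff, Bool.and_eq_false_iff,
    Bool.not_eq_false'] at *
  omega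

lemma pyLt_antisymm {a b : Int × Int} (h1 : pyLt a b = false) (h2 : pyLt b a = false) :
    a = b := by
  simp only [pyLt, Bool.or_eq_false_iff, Bool.and_eq_false_iff, decide_eq_false_iff_not,
    Bool.not_eq_false', decide_eq_true_eq] at *
  obtain ⟨a1, a2⟩ := a
  obtain ⟨b1, b2⟩ := b
  simp only [Prod.mk.injEq]
  dsimp only at h1 h2
  omega

-- `a ≤ b` in the sort order
abbrev Rle (a b : Int × Int) : Prop := pyLt b a = false

lemma pairwise_insertBy (x : Int × Int) (l : List (Int × Int)) (h : l.Pairwise Rle) :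
    (PySem.List.insertBy pyLt x l).Pairwise Rle := by
  induction l with
  | nil =>
    show ([x] : List (Int × Int)).Pairwise Rle
    simp
  | cons y ys ih =>
    show (if pyLt x y = true then x :: y :: ys else y :: PySem.List.insertBy pyLt x ys).Pairwise Rle
    rcases List.pairwise_cons.1 h with ⟨hy, hys⟩
    split_ifs with hb
    · refine List.pairwise_cons.2 ⟨?_, h⟩
      intro z hz
      rcases List.mem_cons.1 hz with rfl | hz
      · exact pyLt_asymm hb
      · exact pyLt_le_trans hb (hy z hz)
    · refine List.pairwise_cons.2 ⟨?_, ih hys⟩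
      intro z hz
      rcases (PySem.List.mem_insertBy pyLt x z ys).1 hz with rfl | hz
      · exact Bool.eq_false_iff.2 hb
      · exact hy z hz

lemma pairwise_foldl_insertBy (xs acc : List (Int × Int)) (hacc : acc.Pairwise Rle) :
    (xs.foldl (fun acc x => PySem.List.insertBy pyLt x acc) acc).Pairwise Rle := by
  induction xs generalizing acc with
  | nil => exact hacc
  | cons x t ih => exact ih _ (pairwise_insertBy x acc hacc)

lemma sorted2_pairwise (xs : List (Int × Int)) :
    (PySem.List.sorted2 xs (fun p => p.1) (fun p => p.2)).Pairwise Rle :=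
  pairwise_foldl_insertBy xs [] (List.Pairwise.nil)

lemma count_cons_int (q r : Int × Int) (t' : List (Int × Int)) :
    ((q :: t').count r : Int) = (if r = q then 1 else 0) + (t'.count r : Int) := by
  simp only [List.count_cons]
  by_cases h : r = q
  · simp [h]
    omega
  · simp [h, Ne.symm h]

-- the run scan counts, for each distinct value, whether its total multiplicity is ≥ 2
lemma runFold (t : List (Int × Int)) (prev : Int × Int) (run tot : Int)
    (hs : (prev :: t).Pairwise Rle) :
    (t.foldl runStep (prev, run, tot)).2.2
      + (if 2 ≤ (t.foldl runStep (prev, run, tot)).2.1 then (1 : Int) else 0)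
    = tot + ∑ q ∈ (prev :: t).toFinset,
        (if 2 ≤ (if q = prev then run else 0) + (t.count q : Int) then (1 : Int) else 0) := by
  induction t generalizing prev run tot with
  | nil =>
    rw [List.foldl_nil]
    have hset : (prev :: ([] : List (Int × Int))).toFinset = {prev} := by simp
    rw [hset, Finset.sum_singleton, if_pos rfl, List.count_nil]
    simp
  | cons q t' ih =>
    rcases List.pairwise_cons.1 hs with ⟨hprev, hqt⟩
    rw [List.foldl_cons]
    by_cases hq : q = prev
    · subst hq
      rw [show runStep (q, run, tot) q = (q, run + 1, tot) from by simp [runStep]]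
      rw [ih q (run + 1) tot hqt]
      congr 1
      have hset : (q :: q :: t').toFinset = (q :: t').toFinset := by
        simp [List.toFinset_cons]
      rw [hset]
      refine Finset.sum_congr rfl fun r _ => ?_
      rw [count_cons_int q r t']
      split_ifs <;> omega
    · rw [show runStep (prev, run, tot) q
          = (q, 1, tot + (if 2 ≤ run then 1 else 0)) from by simp [runStep, hq]]
      rw [ih q 1 _ hqt]
      have hnotmem : prev ∉ (q :: t') := by
        intro hmem
        rcases List.mem_cons.1 hmem with h | h
        · exact hq h.symm
        · rcases List.pairwise_cons.1 hqt with ⟨hq2, _⟩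
          exact hq (pyLt_antisymm (hprev q List.mem_cons_self) (hq2 prev h))
      have hset : (prev :: q :: t').toFinset = insert prev (q :: t').toFinset := by
        simp [List.toFinset_cons]
      rw [hset, Finset.sum_insert (by simpa using hnotmem)]
      have hcprev : (((q :: t').count prev : Nat) : Int) = 0 := by
        simp [List.count_eq_zero_of_not_mem hnotmem]
      rw [if_pos rfl, hcprev, add_zero]
      have hrest : ∑ r ∈ (q :: t').toFinset,
            (if 2 ≤ (if r = q then (1 : Int) else 0) + (t'.count r : Int) then (1 : Int) else 0)
          = ∑ r ∈ (q :: t').toFinset,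
            (if 2 ≤ (if r = prev then run else 0) + (((q :: t').count r : Nat) : Int) then (1 : Int) else 0) := by
        refine Finset.sum_congr rfl fun r hr => ?_
        have hrne : r ≠ prev := by
          intro h
          subst h
          exact hnotmem (List.mem_toFinset.1 hr)
        rw [if_neg hrne, count_cons_int q r t']
        split_ifs <;> omega
      rw [hrest]
      ring

-- B's result as a sum over the distinct covered cells
lemma part1_alt_eq (lines : List ((Int × Int) × (Int × Int))) :
    part1_alt lines
      = ∑ p ∈ (allCells lines).toFinset,
          (if 1 < (allCells lines).count p then (1 : Int) else 0) := by
  unfold part1_alt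
  simp only
  rw [PySem.List.foldl_append_eq_flatMap segCells lines [], List.nil_append,
    show lines.flatMap segCells = allCells lines from by
      unfold allCells
      exact congrArg lines.flatMap (funext segCells_eq_cellsOf)]
  have hperm := PySem.List.sorted2_perm (allCells lines) (fun p : Int × Int => p.1)
    (fun p => p.2) false
  have hpw := sorted2_pairwise (allCells lines)
  cases hsort : PySem.List.sorted2 (allCells lines) (fun p : Int × Int => p.1) (fun p => p.2) with
  | nil =>
    rw [hsort] at hperm
    have hnil : allCells lines = [] := hperm.symm.eq_nil
    rw [hnil]
    simp
  | cons p t =>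
    rw [hsort] at hperm hpw
    have hrun := runFold t p 1 0 hpw
    simp only at hrun ⊢
    rw [hrun, zero_add]
    have hsetEq : (p :: t).toFinset = (allCells lines).toFinset := Finset.ext fun a => by rw [List.mem_toFinset, List.mem_toFinset, hperm.mem_iff]
    have hcntEq : ∀ q, (p :: t).count q = (allCells lines).count q := fun q => hperm.count_eq q
    rw [← hsetEq]
    refine Finset.sum_congr rfl fun q _ => ?_
    rw [← hcntEq q]
    have hc := count_cons_int p q t
    rw [List.count_cons] at hc ⊢
    split_ifs at hc ⊢ <;> omega

-- ===== VERDICT (by name: the statement is the Claim_ definition above) =====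
theorem part1_spec : Claim_equal_part1 := by
  intro lines _ hpre
  unfold Spec_part1
  rw [part1_eq lines hpre, part1_alt_eq lines,
    grid_sum_eq_finset_sum (allCells lines) (mem_allCells_inGrid hpre)]
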